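-- pv_equiv track=rewrite | github.com/Stranger-dv/hacks_python_2 | hack_4.py | fn_hack_4
-- ===== SOURCE A (Python) =====
-- def fn_hack_4(s):
--     result = s
--     _ls = []
--
--     if(len(result) > 3):
--         for letter in result:
--             if letter == result[0]:
--                 continue
--             elif letter == result[-1]:
--                 continue
--             else:
--                 _ls.append(letter)
--
--         result = "".join(_ls)
--     return result
-- ===== SOURCE B (Python) =====
-- def fn_hack_4(s):
--     if len(s) > 3:
--         first, last = s[0], s[-1]
--         return s.replace(first, "").replace(last, "")
--     return s
-- ===== Notes on version B (the rewrite author's own statement) =====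
-- stated objective: idiomatic
-- what changed: Replaces the explicit per-character filtering loop with list accumulator and join by two sequential str.replace library passes that delete all first-char and then all last-char occurrences.
import Mathlib
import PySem

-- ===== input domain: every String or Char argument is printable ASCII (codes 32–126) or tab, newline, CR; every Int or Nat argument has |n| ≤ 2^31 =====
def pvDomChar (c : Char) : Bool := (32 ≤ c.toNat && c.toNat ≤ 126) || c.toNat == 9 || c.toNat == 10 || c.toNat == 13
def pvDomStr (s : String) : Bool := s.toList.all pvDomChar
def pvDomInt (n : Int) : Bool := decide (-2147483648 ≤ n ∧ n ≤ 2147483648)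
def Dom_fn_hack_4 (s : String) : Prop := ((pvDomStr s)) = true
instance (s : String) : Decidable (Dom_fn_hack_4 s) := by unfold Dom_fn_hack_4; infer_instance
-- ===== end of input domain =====

-- B replaces A's explicit filtering loop (accumulate kept letters, join) by two sequential
-- str.replace passes deleting the first and then the last character; same return value.

-- ===== PORT A =====
def fn_hack_4 (s : String) : String :=
  let result := s
  if 3 < PySem.Str.len result then
    -- result[0] / result[-1] always exist under the guard; the fallback branch is a totality guard
    match PySem.Str.pyGet? result 0, PySem.Str.pyGet? result (-1) with
    | some first, some last =>
      let _ls := result.toList.foldl (fun acc letter =>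
        if letter = first then acc
        else if letter = last then acc
        else acc ++ [letter]) []
      String.ofList _ls
    | _, _ => result
  else result

-- ===== PORT B =====
def fn_hack_4_alt (s : String) : String :=
  if 3 < PySem.Str.len s then
    match PySem.Str.pyGet? s 0 with
    | none => s
    | some first =>
      match PySem.Str.pyGet? s (-1) with
      | none => s
      | some last =>
        PySem.Str.replace (PySem.Str.replace s (String.ofList [first]) "") (String.ofList [last]) ""

  else s

-- ===== PRECONDITION & SPEC =====
def Spec_fn_hack_4 (s : String) (out : String) : Prop := out = fn_hack_4_alt s
instance (s : String) (out : String) : Decidable (Spec_fn_hack_4 s out) := by unfold Spec_fn_hack_4; infer_instance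

-- ===== CLAIM (what is proved, stated in full; the proofs are below) =====
def Claim_equal_fn_hack_4 : Prop := ∀ (s : String), Dom_fn_hack_4 s → Spec_fn_hack_4 s (fn_hack_4 s)

-- ===== LEMMAS AND PROOFS =====

-- replace.go with a single-char pattern and empty replacement is a filter
theorem replace_go_single (a : Char) (l : List Char) :
    ∀ (fuel : Nat) (acc : List Char), l.length ≤ fuel →
      PySem.Chars.replace.go [a] [] fuel l acc
        = acc.reverse ++ l.filter (fun c => !(c == a)) := by
  induction l with
  | nil =>
      intro fuel acc _
      cases fuel <;> simp [PySem.Chars.replace.go]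
  | cons c t ih =>
      intro fuel acc hlen
      cases fuel with
      | zero => simp at hlen
      | succ n =>
        have hn : t.length ≤ n := by simpa using hlen
        by_cases h : a = c
        · subst h
          have hpre : [a].isPrefixOf (a :: t) = true := by simp [List.isPrefixOf]
          simp [PySem.Chars.replace.go, hpre, ih n acc hn]
        · have hpre : [a].isPrefixOf (c :: t) = false := by
            simp [List.isPrefixOf]; exact h
          have hca : (c == a) = false := by simp [Ne.symm h]
          simp [PySem.Chars.replace.go, hpre, ih n (c :: acc) hn, hca]

theorem replace_single_empty (cs : List Char) (a : Char) :
    PySem.Chars.replace cs [a] [] = cs.filter (fun c => !(c == a)) := by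
  simp [PySem.Chars.replace, replace_go_single a cs cs.length [] le_rfl]

-- ===== VERDICT (by name: the statement is the Claim_ definition above) =====
theorem fn_hack_4_spec : Claim_equal_fn_hack_4 := by
  intro s _
  unfold Spec_fn_hack_4 fn_hack_4 fn_hack_4_alt
  by_cases hlen : 3 < PySem.Str.len s
  · simp only [hlen, if_true]
    cases h0 : PySem.Str.pyGet? s 0 with
    | none => rfl
    | some first =>
      cases h1 : PySem.Str.pyGet? s (-1) with
      | none => rfl
      | some last =>
        simp only []
        -- A's loop is a filter
        have hA : s.toList.foldl (fun acc letter =>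
            if letter = first then acc
            else if letter = last then acc
            else acc ++ [letter]) []
            = s.toList.filter (fun c => !(c == first) && !(c == last)) := by
          have := PySem.List.foldl_append_ite_eq_filter
            (fun x => ¬(x = first ∨ x = last)) s.toList []
          rw [show (fun (acc : List Char) (letter : Char) =>
              if letter = first then acc
              else if letter = last then acc
              else acc ++ [letter])
            = (fun acc x => if ¬(x = first ∨ x = last) then acc ++ [x] else acc) by
              funext acc x; by_cases hx : x = first <;> by_cases hy : x = last <;>
                simp [hx, hy]]
          rw [this, List.nil_append]
          apply List.filter_congr
          intro c _
          by_cases hx : c = first <;> by_cases hy : c = last <;> simp [hx, hy]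
        -- B's two replaces are the same filter
        have hB : PySem.Str.replace (PySem.Str.replace s (String.ofList [first]) "")
              (String.ofList [last]) ""
            = String.ofList (s.toList.filter (fun c => !(c == first) && !(c == last))) := by
          simp only [PySem.Str.replace, String.toList_ofList, String.toList_empty]
          rw [replace_single_empty s.toList first, replace_single_empty _ last,
            List.filter_filter]
          congr 1
          apply List.filter_congr
          intro c _
          rw [Bool.and_comm]
        rw [hA, hB]
  · rw [show PySem.Str.len s = s.length from by simp [PySem.Str.len]] at hlen
    simp [hlen]
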